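-- pv_equiv track=rewrite | github.com/dk1ri/MYC_project | MYC_commandrouter/commandrouter/commandrouter_misc_functions.py | split_desc
-- ===== SOURCE A (Python) =====
-- def split_desc(announcement):
-- #delete description from a announcement line
--     items=[]
--     no_desc=[]
--     items=announcement.split(";")
--     for item in items:
--         tr=item.split(",")
--         no_desc.append(item.split(",")[0])
--     return(";".join(no_desc))
-- ===== SOURCE B (Python) =====
-- def split_desc(announcement):
--     # single left-to-right character scan: copy chars, but after a ',' skip
--     # everything until the next ';' (which resets the field)
--     out = []
--     skip = False
--     for c in announcement:
--         if c == ';':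
--             out.append(c)
--             skip = False
--         elif c == ',':
--             skip = True
--         elif not skip:
--             out.append(c)
--     return ''.join(out)
-- ===== Notes on version B (the rewrite author's own statement) =====
-- stated objective: alternative
-- what changed: Replaced split-on-';' / per-field split-on-',' / join with a single character scan carrying a skip flag that drops each field's suffix after its first comma.
import Mathlib
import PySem

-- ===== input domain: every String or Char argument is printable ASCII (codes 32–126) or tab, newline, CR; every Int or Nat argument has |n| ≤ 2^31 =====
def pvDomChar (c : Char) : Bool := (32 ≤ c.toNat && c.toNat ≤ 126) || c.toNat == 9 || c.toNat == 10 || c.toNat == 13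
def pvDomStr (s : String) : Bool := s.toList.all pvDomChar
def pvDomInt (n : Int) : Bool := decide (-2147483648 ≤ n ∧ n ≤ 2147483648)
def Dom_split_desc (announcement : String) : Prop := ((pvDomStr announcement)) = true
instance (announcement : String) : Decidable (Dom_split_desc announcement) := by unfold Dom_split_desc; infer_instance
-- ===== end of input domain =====

-- B replaces split/per-field-split/join with a single character scan carrying a skip flag (alternative decomposition; return value only, no mutation).

-- ===== PORT A =====
-- items = announcement.split(";"); for each item keep item.split(",")[0]; ";".join(...)
-- (split(",") always returns a nonempty list, so the Python [0] never raises; headD [] is that [0])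
def split_desc (announcement : String) : String :=
  let items := PySem.Chars.splitOn announcement.toList [';']
  let no_desc := items.map (fun item => (PySem.Chars.splitOn item [',']).headD [])
  String.ofList (PySem.Chars.join [';'] no_desc)

-- ===== PORT B =====
-- out = []; skip = False; for c in announcement: ';' -> emit, skip=False; ',' -> skip=True; else emit if not skip
def stepB (st : List Char × Bool) (c : Char) : List Char × Bool :=
  if c = ';' then (st.1 ++ [';'], false)
  else if c = ',' then (st.1, true)
  else if !st.2 then (st.1 ++ [c], st.2)
  else st

def split_desc_alt (announcement : String) : String :=
  let r := announcement.toList.foldl stepB ([], false)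
  String.ofList r.1

-- ===== PRECONDITION & SPEC =====
def Spec_split_desc (announcement : String) (out : String) : Prop := out = split_desc_alt announcement
instance (announcement : String) (out : String) : Decidable (Spec_split_desc announcement out) := by unfold Spec_split_desc; infer_instance

-- ===== CLAIM (what is proved, stated in full; the proofs are below) =====
def Claim_equal_split_desc : Prop := ∀ (announcement : String), Dom_split_desc announcement → Spec_split_desc announcement (split_desc announcement)

-- ===== LEMMAS AND PROOFS =====

-- reference single-char splitter: sp a l = l split at every occurrence of a
def sp (a : Char) : List Char → List (List Char)
  | [] => [[]]
  | c :: cs => if c = a then [] :: sp a cs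
               else match sp a cs with
                    | [] => [[c]]
                    | h :: t => (c :: h) :: t

-- prepend onto the head piece
def hcons (pre : List Char) : List (List Char) → List (List Char)
  | [] => [pre]
  | h :: t => (pre ++ h) :: t

-- the scan spec: g l skip = what B's loop still emits
def g : List Char → Bool → List Char
  | [], _ => []
  | c :: cs, skip =>
      if c = ';' then ';' :: g cs false
      else if c = ',' then g cs true
      else if skip then g cs skip else c :: g cs skip

theorem sp_ne_nil (a : Char) (l : List Char) : sp a l ≠ [] := by
  cases l with
  | nil => simp [sp]
  | cons c cs =>
    simp only [sp]
    split_ifs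
    · simp
    · cases h : sp a cs <;> simp

theorem go_single (a : Char) : ∀ (fuel : Nat) (l cur : List Char) (acc : List (List Char)),
    l.length ≤ fuel →
    PySem.Chars.splitOn.go [a] fuel l cur acc = acc.reverse ++ hcons cur.reverse (sp a l) := by
  intro fuel
  induction fuel with
  | zero =>
    intro l cur acc h
    have hl : l = [] := List.eq_nil_of_length_eq_zero (Nat.le_zero.mp h)
    subst hl
    simp [PySem.Chars.splitOn.go, sp, hcons]
  | succ n ih =>
    intro l cur acc h
    cases l with
    | nil => simp [PySem.Chars.splitOn.go, sp, hcons]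
    | cons c rest =>
      rw [PySem.Chars.splitOn.go.eq_def]
      by_cases hc : c = a
      · subst hc
        have hpre : List.isPrefixOf [c] (c :: rest) = true := by
          simp [List.isPrefixOf]
        simp only [hpre, if_true, List.length_cons, List.drop_succ_cons, List.length_nil, List.drop_zero]
        rw [ih rest [] (cur.reverse :: acc) (Nat.le_of_succ_le_succ h)]
        simp only [sp, hcons, if_pos rfl, List.reverse_cons, List.append_assoc,
          List.singleton_append, List.nil_append]
        cases hsp : sp c rest with
        | nil => exact absurd hsp (sp_ne_nil c rest)
        | cons h' t' => simp [hcons]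
      · have hpre : List.isPrefixOf [a] (c :: rest) = false := by
          simp [List.isPrefixOf]
          exact fun hh => absurd hh.symm hc
        simp only [hpre, Bool.false_eq_true, if_false]
        rw [ih rest (c :: cur) acc (Nat.le_of_succ_le_succ (by simpa using h))]
        congr 1
        simp only [sp, hc, if_false, List.reverse_cons]
        cases hsp : sp a rest with
        | nil => exact absurd hsp (sp_ne_nil a rest)
        | cons h' t' => simp [hcons]

theorem splitOn_single (a : Char) (l : List Char) :
    PySem.Chars.splitOn l [a] = sp a l := by
  rw [PySem.Chars.splitOn, go_single a (l.length + 1) l [] [] (Nat.le_succ _)]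
  cases hsp : sp a l with
  | nil => exact absurd hsp (sp_ne_nil a l)
  | cons h t => simp [hcons]

theorem headD_sp_comma (l : List Char) :
    (sp ',' l).headD [] = l.takeWhile (· ≠ ',') := by
  induction l with
  | nil => simp [sp]
  | cons c cs ih =>
    by_cases hc : c = ','
    · subst hc; simp [sp, List.takeWhile]
    · simp only [sp, hc, if_false]
      cases hsp : sp ',' cs with
      | nil => exact absurd hsp (sp_ne_nil ',' cs)
      | cons h t =>
        rw [hsp] at ih
        simp only [List.headD] at ih ⊢
        simp [List.takeWhile_cons, hc, ih]

-- g versus A's split/map/join, proved simultaneously for both skip values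
theorem g_eq_join (cs : List Char) :
    g cs false = PySem.Chars.join [';'] ((sp ';' cs).map (fun f => f.takeWhile (· ≠ ','))) ∧
    g cs true = PySem.Chars.join [';'] ([] :: ((sp ';' cs).map (fun f => f.takeWhile (· ≠ ','))).tail) := by
  induction cs with
  | nil => simp [g, sp, PySem.Chars.join, List.intercalate, List.intersperse, List.flatten]
  | cons c cs ih =>
    obtain ⟨ihf, iht⟩ := ih
    by_cases hsemi : c = ';'
    · subst hsemi
      cases hsp : sp ';' cs with
      | nil => exact absurd hsp (sp_ne_nil ';' cs)
      | cons h t =>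
        rw [hsp] at ihf iht
        constructor <;>
          simp [g, sp, hsp, PySem.Chars.join, List.intercalate, List.intersperse, ihf,
            List.flatten] <;>
          cases t <;>
          simp_all [PySem.Chars.join, List.intercalate, List.intersperse, List.flatten]
    · cases hsp : sp ';' cs with
      | nil => exact absurd hsp (sp_ne_nil ';' cs)
      | cons h t =>
        rw [hsp] at ihf iht
        have hspc : sp ';' (c :: cs) = (c :: h) :: t := by
          simp [sp, hsemi, hsp]
        by_cases hcomma : c = ','
        · subst hcomma
          have hg : ∀ b, g (',' :: cs) b = g cs true := by intro b; simp [g]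
          refine ⟨?_, ?_⟩
          · rw [hg, iht, hspc]; simp [List.takeWhile_cons]
          · rw [hg, iht, hspc]; simp
        · have hgf : g (c :: cs) false = c :: g cs false := by simp [g, hsemi, hcomma]
          have hgt : g (c :: cs) true = g cs true := by simp [g, hsemi, hcomma]
          refine ⟨?_, ?_⟩
          · rw [hgf, ihf, hspc]
            simp only [List.map_cons, List.takeWhile_cons, hcomma, hsemi]
            cases t <;>
              simp [PySem.Chars.join, List.intercalate, List.intersperse, List.flatten,
                hcomma, decide_eq_true_eq]
          · rw [hgt, iht, hspc]; simp

-- B's foldl accumulates g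
theorem foldl_scan (cs : List Char) : ∀ (acc : List Char) (skip : Bool),
    (cs.foldl stepB (acc, skip)).1 = acc ++ g cs skip := by
  induction cs with
  | nil => intro acc skip; simp [g]
  | cons c cs ih =>
    intro acc skip
    rw [List.foldl_cons]
    by_cases h1 : c = ';'
    · subst h1
      rw [show stepB (acc, skip) ';' = (acc ++ [';'], false) from by simp [stepB], ih]
      simp [g]
    · by_cases h2 : c = ','
      · subst h2
        rw [show stepB (acc, skip) ',' = (acc, true) from by simp [stepB, h1], ih]
        simp [g, h1]
      · cases skip with
        | false =>
          rw [show stepB (acc, false) c = (acc ++ [c], false) from by simp [stepB, h1, h2], ih]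
          simp [g, h1, h2]
        | true =>
          rw [show stepB (acc, true) c = (acc, true) from by simp [stepB, h1, h2], ih]
          simp [g, h1, h2]

-- ===== VERDICT (by name: the statement is the Claim_ definition above) =====
theorem split_desc_spec : Claim_equal_split_desc := by
  intro announcement _
  unfold Spec_split_desc split_desc split_desc_alt
  simp only [splitOn_single]
  have h1 : ((sp ';' announcement.toList).map
      (fun item => (sp ',' item).headD [])) =
      (sp ';' announcement.toList).map (fun f => f.takeWhile (· ≠ ',')) := by
    apply List.map_congr_left
    intro x _
    exact headD_sp_comma x
  rw [h1, ← (g_eq_join announcement.toList).1, foldl_scan announcement.toList [] false]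
  simp
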